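-- pv_equiv track=rewrite | github.com/ryanjm/QuoteVaultManager | quote_vault_manager/quote_writer.py | _find_blockquote_with_id
-- ===== SOURCE A (Python) =====
-- def _is_blockquote_line(line: str) -> bool:
--     """Check if a line starts a blockquote."""
--     return line.strip().startswith('>')
--
-- def _find_blockquote_with_id(lines, block_id):
--     """Find the start/end indices of the blockquote with the given block_id."""
--     i = 0
--     while i < len(lines):
--         if _is_blockquote_line(lines[i]):
--             start = i
--             # Collect all consecutive blockquote lines
--             while i < len(lines) and _is_blockquote_line(lines[i]):
--                 i += 1
--             # Check if the next line is the block ID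
--             if i < len(lines) and lines[i].strip() == block_id:
--                 end = i  # end is index of block_id line
--                 return start, end
--         i += 1
--     return None, None
-- ===== SOURCE B (Python) =====
-- def _is_blockquote_line(line: str) -> bool:
--     """Check if a line starts a blockquote."""
--     return line.strip().startswith('>')
--
-- def _find_blockquote_with_id(lines, block_id):
--     """Two passes: collect maximal runs of blockquote lines, then match ids."""
--     runs = []
--     start = None
--     for i, line in enumerate(lines):
--         if _is_blockquote_line(line):
--             if start is None:
--                 start = i
--         else:
--             if start is not None:
--                 runs.append((start, i))
--             start = None
--     if start is not None:
--         runs.append((start, len(lines)))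
--     for s, e in runs:
--         if e < len(lines) and lines[e].strip() == block_id:
--             return s, e
--     return None, None
-- ===== Notes on version B (the rewrite author's own statement) =====
-- stated objective: alternative
-- what changed: Replaced A's interleaved nested while-loops (run detection and id matching mixed in one scan with manual index arithmetic) by two separate passes: one enumerate-fold collecting all maximal blockquote runs as (start,end) pairs, then a scan of those runs for the first one followed by the id line.
import Mathlib
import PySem

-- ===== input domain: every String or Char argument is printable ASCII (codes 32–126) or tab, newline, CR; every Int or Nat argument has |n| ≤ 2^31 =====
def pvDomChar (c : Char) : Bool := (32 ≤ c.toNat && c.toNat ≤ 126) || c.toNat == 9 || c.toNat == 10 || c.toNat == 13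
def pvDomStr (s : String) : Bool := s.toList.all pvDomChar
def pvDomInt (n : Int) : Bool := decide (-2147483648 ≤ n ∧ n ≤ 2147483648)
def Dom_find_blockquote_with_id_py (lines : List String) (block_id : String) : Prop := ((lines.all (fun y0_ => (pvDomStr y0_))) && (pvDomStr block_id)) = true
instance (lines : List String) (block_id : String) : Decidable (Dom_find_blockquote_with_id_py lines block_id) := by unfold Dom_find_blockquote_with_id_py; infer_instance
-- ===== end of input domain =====

-- B replaces A's interleaved nested while-loops by two separate passes (collect all
-- maximal blockquote runs, then scan the runs for the first followed by the id line);
-- objective: alternative decomposition, same cost.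

-- ===== PORT A =====
-- _is_blockquote_line(line) = line.strip().startswith('>')
def pvBq (line : String) : Bool := PySem.Str.startswith (PySem.Str.strip line) ">"

-- inner while of A: advance i past consecutive blockquote lines
def pvSkip (lines : List String) (i : Nat) : Nat :=
  if h : i < lines.length then
    if pvBq lines[i] then pvSkip lines (i + 1) else i
  else i
termination_by lines.length - i

-- termination helper for the outer loop (cited by pvALoop's decreasing_by)
theorem pvSkip_ge (lines : List String) (i : Nat) : i ≤ pvSkip lines i := by
  fun_induction pvSkip lines i with
  | case1 _ _ _ ih => omega
  | case2 => omega
  | case3 => omega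

-- outer while of A
def pvALoop (lines : List String) (block_id : String) (i : Nat) : Option Int × Option Int :=
  if h : i < lines.length then
    if pvBq lines[i] then
      let j := pvSkip lines i
      if decide (j < lines.length) && (PySem.Str.strip (lines.getD j "") == block_id) then
        (some (i : Int), some (j : Int))
      else pvALoop lines block_id (j + 1)
    else pvALoop lines block_id (i + 1)
  else (none, none)
termination_by lines.length - i
decreasing_by
  · have := pvSkip_ge lines i; omega
  · omega

def find_blockquote_with_id_py (lines : List String) (block_id : String) : Option Int × Option Int :=
  pvALoop lines block_id 0

-- ===== PORT B =====
-- one fold step of B's first pass (run collection with a pending-run start)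
def pvBStep (st : List (Int × Int) × Option Int) (p : Int × String) : List (Int × Int) × Option Int :=
  if pvBq p.2 then
    match st.2 with
    | none => (st.1, some p.1)
    | some s => (st.1, some s)
  else
    match st.2 with
    | some s => (st.1 ++ [(s, p.1)], none)
    | none => (st.1, none)

def find_blockquote_with_id_py_alt (lines : List String) (block_id : String) : Option Int × Option Int :=
  let st := (PySem.List.enumerate lines).foldl pvBStep ([], none)
  let runs := match st.2 with
    | some s => st.1 ++ [(s, (lines.length : Int))]
    | none => st.1
  match runs.find? (fun p => decide (p.2 < (lines.length : Int)) && (PySem.Str.strip (lines.getD p.2.toNat "") == block_id)) with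
  | some (s, e) => (some s, some e)
  | none => (none, none)

-- ===== PRECONDITION & SPEC =====
def Spec_find_blockquote_with_id_py (lines : List String) (block_id : String) (out : Option Int × Option Int) : Prop := out = find_blockquote_with_id_py_alt lines block_id
instance (lines : List String) (block_id : String) (out : Option Int × Option Int) : Decidable (Spec_find_blockquote_with_id_py lines block_id out) := by unfold Spec_find_blockquote_with_id_py; infer_instance

-- ===== CLAIM (what is proved, stated in full; the proofs are below) =====
def Claim_equal_find_blockquote_with_id_py : Prop := ∀ (lines : List String) (block_id : String), Dom_find_blockquote_with_id_py lines block_id → Spec_find_blockquote_with_id_py lines block_id (find_blockquote_with_id_py lines block_id)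

-- ===== LEMMAS AND PROOFS =====

-- the list of maximal blockquote runs starting the scan at index i (proof-side bridge)
def pvRuns (lines : List String) (i : Nat) : List (Int × Int) :=
  if h : i < lines.length then
    if pvBq lines[i] then
      ((i : Int), (pvSkip lines i : Int)) :: pvRuns lines (pvSkip lines i + 1)
    else pvRuns lines (i + 1)
  else []
termination_by lines.length - i
decreasing_by
  · have := pvSkip_ge lines i; omega
  · omega

def pvMatch (lines : List String) (block_id : String) : Int × Int → Bool :=
  fun p => decide (p.2 < (lines.length : Int)) && (PySem.Str.strip (lines.getD p.2.toNat "") == block_id)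

def pvOut : Option (Int × Int) → Option Int × Option Int
  | some (s, e) => (some s, some e)
  | none => (none, none)

theorem pvSkip_oob (lines : List String) (i : Nat) (h : lines.length ≤ i) :
    pvSkip lines i = i := by
  rw [pvSkip, dif_neg (by omega)]

theorem pvSkip_not_bq (lines : List String) (i : Nat) (hi : i < lines.length)
    (hb : ¬ pvBq lines[i] = true) : pvSkip lines i = i := by
  rw [pvSkip, dif_pos hi, if_neg hb]

theorem pvSkip_bq (lines : List String) (i : Nat) (hi : i < lines.length) (hb : pvBq lines[i] = true) :
    pvSkip lines i = pvSkip lines (i + 1) := by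
  rw [pvSkip]; rw [dif_pos hi, if_pos hb]

-- A's loop returns the first matching run among pvRuns
theorem pvALoop_eq_runs (lines : List String) (block_id : String) (i : Nat) :
    pvALoop lines block_id i = pvOut ((pvRuns lines i).find? (pvMatch lines block_id)) := by
  fun_induction pvALoop lines block_id i with
  | case1 i hi hb j hm =>
    rw [pvRuns, dif_pos hi, if_pos hb, List.find?_cons_of_pos]
    · rfl
    · simpa [pvMatch] using hm
  | case2 i hi hb j hm ih =>
    rw [pvRuns, dif_pos hi, if_pos hb, List.find?_cons_of_neg, ih]
    simpa [pvMatch] using hm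
  | case3 i hi hb ih =>
    conv_rhs => rw [pvRuns, dif_pos hi, if_neg hb]
    exact ih
  | case4 i hi =>
    rw [pvRuns, dif_neg hi]; rfl

def pvFlush (lines : List String) (st : List (Int × Int) × Option Int) : List (Int × Int) :=
  match st.2 with
  | some s => st.1 ++ [(s, (lines.length : Int))]
  | none => st.1

-- the fold of B's first pass, run from index i, produces exactly the runs from i
theorem pvFold_runs (lines : List String) (i : Nat) (hle : i ≤ lines.length)
    (acc : List (Int × Int)) :
    (pvFlush lines ((PySem.List.enumerate (lines.drop i) (i : Int)).foldl pvBStep (acc, none))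
       = acc ++ pvRuns lines i)
    ∧ (∀ s : Int,
        pvFlush lines ((PySem.List.enumerate (lines.drop i) (i : Int)).foldl pvBStep (acc, some s))
          = acc ++ ((s, (pvSkip lines i : Int)) :: pvRuns lines (pvSkip lines i + 1))) := by
  induction hk : lines.length - i using Nat.strong_induction_on generalizing i acc with
  | _ k ih =>
  by_cases hi : i < lines.length
  · have hdrop : lines.drop i = lines[i] :: lines.drop (i + 1) :=
      List.drop_eq_getElem_cons hi
    have henum : PySem.List.enumerate (lines.drop i) (i : Int)
        = ((i : Int), lines[i]) :: PySem.List.enumerate (lines.drop (i + 1)) ((i + 1 : Nat) : Int) := by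
      rw [hdrop, PySem.List.enumerate_cons]; push_cast; ring_nf
    have hrec := fun acc' => ih (lines.length - (i + 1)) (by omega) (i + 1) (by omega) acc' rfl
    by_cases hb : pvBq lines[i] = true
    · constructor
      · rw [henum, List.foldl_cons]
        have hstep : pvBStep (acc, none) ((i : Int), lines[i]) = (acc, some (i : Int)) := by
          simp [pvBStep, hb]
        rw [hstep, (hrec acc).2 (i : Int)]
        conv_rhs => rw [pvRuns, dif_pos hi, if_pos hb]
        rw [pvSkip_bq lines i hi hb]
      · intro s
        rw [henum, List.foldl_cons]
        have hstep : pvBStep (acc, some s) ((i : Int), lines[i]) = (acc, some s) := by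
          simp [pvBStep, hb]
        rw [hstep, (hrec acc).2 s, pvSkip_bq lines i hi hb]
    · constructor
      · rw [henum, List.foldl_cons]
        have hstep : pvBStep (acc, none) ((i : Int), lines[i]) = (acc, none) := by
          simp [pvBStep, hb]
        rw [hstep, (hrec acc).1]
        conv_rhs => rw [pvRuns, dif_pos hi, if_neg hb]
      · intro s
        rw [henum, List.foldl_cons]
        have hstep : pvBStep (acc, some s) ((i : Int), lines[i]) = (acc ++ [(s, (i : Int))], none) := by
          simp [pvBStep, hb]
        rw [hstep, (hrec (acc ++ [(s, (i : Int))])).1]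
        rw [pvSkip_not_bq lines i hi hb]
        simp
  · have hin : i = lines.length := by omega
    have hd : lines.drop i = [] := List.drop_eq_nil_of_le (by omega)
    have hsk : pvSkip lines i = i := pvSkip_oob lines i (by omega)
    rw [hd]
    constructor
    · rw [PySem.List.enumerate_nil, List.foldl_nil, pvRuns, dif_neg hi]
      simp [pvFlush]
    · intro s
      rw [PySem.List.enumerate_nil, List.foldl_nil, hsk]
      have h2 : pvRuns lines (i + 1) = [] := by rw [pvRuns, dif_neg (by omega)]
      rw [h2]
      simp [pvFlush, hin]

-- ===== VERDICT (by name: the statement is the Claim_ definition above) =====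
theorem find_blockquote_with_id_py_spec : Claim_equal_find_blockquote_with_id_py := by
  intro lines block_id _
  unfold Spec_find_blockquote_with_id_py
  unfold find_blockquote_with_id_py find_blockquote_with_id_py_alt
  rw [pvALoop_eq_runs]
  have h := (pvFold_runs lines 0 (Nat.zero_le _) []).1
  rw [List.drop_zero] at h
  unfold pvFlush at h
  simp only [Nat.cast_zero, List.nil_append] at h
  simp only [show (fun p : Int × Int => decide (p.2 < (lines.length : Int)) && (PySem.Str.strip (lines.getD p.2.toNat "") == block_id)) = pvMatch lines block_id from rfl]
  show pvOut ((pvRuns lines 0).find? (pvMatch lines block_id)) =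
    (match (match ((PySem.List.enumerate lines (0 : Int)).foldl pvBStep (([] : List (Int × Int)), (none : Option Int))).2 with
        | some s => ((PySem.List.enumerate lines (0 : Int)).foldl pvBStep (([] : List (Int × Int)), (none : Option Int))).1 ++ [(s, (lines.length : Int))]
        | none => ((PySem.List.enumerate lines (0 : Int)).foldl pvBStep (([] : List (Int × Int)), (none : Option Int))).1).find? (pvMatch lines block_id) with
      | some (s, e) => (some s, some e)
      | none => (none, none))
  rw [h]
  rcases (pvRuns lines 0).find? (pvMatch lines block_id) with _ | ⟨s, e⟩ <;> rfl
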